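-- pv_equiv track=rewrite | github.com/hackesmit/gym-tracker | backend/app/muscle_rank_config.py | rank_from_reps
-- ===== SOURCE A (Python) =====
-- RANK_ORDER = [
--     "Copper",
--     "Bronze",
--     "Silver",
--     "Gold",
--     "Platinum",
--     "Diamond",
--     "Champion",
-- ]
--
-- def rank_from_reps(reps: int, rep_thresholds: dict[str, int]) -> str:
--     best = "Copper"
--     for tier in RANK_ORDER:
--         if tier == "Copper":
--             continue
--         cutoff = rep_thresholds.get(tier)
--         if cutoff is None:
--             continue
--         if reps >= cutoff:
--             best = tier
--     return best
-- ===== SOURCE B (Python) =====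
-- RANK_ORDER = [
--     "Copper",
--     "Bronze",
--     "Silver",
--     "Gold",
--     "Platinum",
--     "Diamond",
--     "Champion",
-- ]
--
-- def rank_from_reps(reps: int, rep_thresholds: dict[str, int]) -> str:
--     for tier in reversed(RANK_ORDER):
--         if tier == "Copper":
--             break
--         cutoff = rep_thresholds.get(tier)
--         if cutoff is not None and reps >= cutoff:
--             return tier
--     return "Copper"
-- ===== Notes on version B (the rewrite author's own statement) =====
-- stated objective: idiomatic
-- what changed: B scans the rank order from the highest tier downward and returns the first tier whose threshold is met (short-circuit), instead of A's full bottom-up scan that keeps overwriting a 'best' accumulator.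
import Mathlib
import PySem

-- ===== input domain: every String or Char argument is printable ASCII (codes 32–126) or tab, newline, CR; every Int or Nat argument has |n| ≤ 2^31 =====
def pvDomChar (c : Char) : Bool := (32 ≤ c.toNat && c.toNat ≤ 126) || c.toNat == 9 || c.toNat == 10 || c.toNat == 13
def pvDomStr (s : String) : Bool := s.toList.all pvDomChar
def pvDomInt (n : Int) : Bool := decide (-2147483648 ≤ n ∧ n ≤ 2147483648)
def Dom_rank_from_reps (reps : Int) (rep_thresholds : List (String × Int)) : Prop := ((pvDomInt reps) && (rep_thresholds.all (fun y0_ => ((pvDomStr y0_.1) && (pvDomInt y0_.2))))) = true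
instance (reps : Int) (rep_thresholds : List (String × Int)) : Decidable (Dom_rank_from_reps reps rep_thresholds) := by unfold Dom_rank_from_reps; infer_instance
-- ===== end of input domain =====

-- B walks the rank order top-down and returns the first qualifying tier (short-circuit),
-- instead of A's bottom-up overwrite-last-wins scan; idiomatic, same cost.

def RANK_ORDER : List String :=
  ["Copper", "Bronze", "Silver", "Gold", "Platinum", "Diamond", "Champion"]

-- ===== PORT A =====
-- rep_thresholds.get(tier): association-list lookup, first match
def rank_from_reps (reps : Int) (rep_thresholds : List (String × Int)) : String :=
  RANK_ORDER.foldl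
    (fun best tier =>
      if tier == "Copper" then best
      else
        match List.lookup tier rep_thresholds with
        | none => best
        | some cutoff => if reps ≥ cutoff then tier else best)
    "Copper"

-- ===== PORT B =====
-- the 'for tier in reversed(RANK_ORDER)' loop with early return / break
def rankFromTop (reps : Int) (rep_thresholds : List (String × Int)) : List String → String
  | [] => "Copper"
  | tier :: rest =>
    if tier == "Copper" then "Copper"
    else
      match List.lookup tier rep_thresholds with
      | some cutoff =>
        if reps ≥ cutoff then tier else rankFromTop reps rep_thresholds rest
      | none => rankFromTop reps rep_thresholds rest

def rank_from_reps_alt (reps : Int) (rep_thresholds : List (String × Int)) : String :=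
  rankFromTop reps rep_thresholds RANK_ORDER.reverse

-- ===== PRECONDITION & SPEC =====
def Spec_rank_from_reps (reps : Int) (rep_thresholds : List (String × Int)) (out : String) : Prop := out = rank_from_reps_alt reps rep_thresholds
instance (reps : Int) (rep_thresholds : List (String × Int)) (out : String) : Decidable (Spec_rank_from_reps reps rep_thresholds out) := by unfold Spec_rank_from_reps; infer_instance

-- ===== CLAIM (what is proved, stated in full; the proofs are below) =====
def Claim_equal_rank_from_reps : Prop := ∀ (reps : Int) (rep_thresholds : List (String × Int)), Dom_rank_from_reps reps rep_thresholds → Spec_rank_from_reps reps rep_thresholds (rank_from_reps reps rep_thresholds)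

-- ===== LEMMAS AND PROOFS =====

-- ===== VERDICT (by name: the statement is the Claim_ definition above) =====
theorem rank_from_reps_spec : Claim_equal_rank_from_reps := by
  intro reps thr _
  unfold Spec_rank_from_reps rank_from_reps rank_from_reps_alt RANK_ORDER
  simp only [List.foldl, List.reverse, List.reverseAux]
  rcases hB : List.lookup "Bronze" thr with _ | cB <;>
  rcases hS : List.lookup "Silver" thr with _ | cS <;>
  rcases hG : List.lookup "Gold" thr with _ | cG <;>
  rcases hP : List.lookup "Platinum" thr with _ | cP <;>
  rcases hD : List.lookup "Diamond" thr with _ | cD <;>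
  rcases hC : List.lookup "Champion" thr with _ | cC <;>
  simp only [rankFromTop, hB, hS, hG, hP, hD, hC, beq_iff_eq, reduceIte,
    String.reduceEq, if_false]
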